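-- pv_equiv track=rewrite | github.com/ATGCS/deerflow-agent | backend/packages/harness/deerflow/tools/builtins/supervisor/dependency.py | _build_subtask_name_index
-- ===== SOURCE A (Python) =====
-- from typing import Any
--
-- def _build_subtask_name_index(by_id: dict[str, dict[str, Any]]) -> dict[str, list[str]]:
--     """Name -> [subtask ids] index for resolving depends_on that use names."""
--     idx: dict[str, list[str]] = {}
--     for sid, st in by_id.items():
--         nm = str(st.get("name") or "").strip()
--         if not nm:
--             continue
--         idx.setdefault(nm, []).append(sid)
--     return idx
-- ===== SOURCE B (Python) =====
-- def _build_subtask_name_index(by_id):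
--     """Name -> [subtask ids] index for resolving depends_on that use names."""
--     pairs = [(str(st.get("name") or "").strip(), sid) for sid, st in by_id.items()]
--     pairs = [(nm, sid) for nm, sid in pairs if nm]
--     names = dict.fromkeys(nm for nm, _ in pairs)
--     return {nm: [sid for n, sid in pairs if n == nm] for nm in names}
-- ===== Notes on version B (the rewrite author's own statement) =====
-- stated objective: alternative
-- what changed: Replaces the single setdefault-accumulation pass with a two-phase grouping: extract and filter (name, sid) pairs, dedup the names in first-occurrence order, then build each id list by a scan over the pairs.
import Mathlib
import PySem

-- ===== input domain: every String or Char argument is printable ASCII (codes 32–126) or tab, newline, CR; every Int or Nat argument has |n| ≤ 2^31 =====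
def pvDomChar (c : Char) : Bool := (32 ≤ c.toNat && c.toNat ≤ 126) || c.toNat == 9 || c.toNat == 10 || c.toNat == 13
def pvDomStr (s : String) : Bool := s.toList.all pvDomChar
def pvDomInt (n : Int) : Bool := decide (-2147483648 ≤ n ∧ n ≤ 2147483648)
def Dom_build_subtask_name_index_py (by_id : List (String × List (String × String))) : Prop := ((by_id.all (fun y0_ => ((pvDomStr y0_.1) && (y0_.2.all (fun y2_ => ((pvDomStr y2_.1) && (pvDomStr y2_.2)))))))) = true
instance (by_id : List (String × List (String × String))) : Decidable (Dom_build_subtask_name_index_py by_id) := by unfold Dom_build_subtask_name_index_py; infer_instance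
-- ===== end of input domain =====

-- B builds the index by a two-phase grouping (filtered pairs, dedup'd names, per-name scan)
-- instead of A's one-pass setdefault accumulation; alternative decomposition, not faster.

-- ===== PORT A =====
-- nm = str(st.get("name") or "").strip()   (values are strings, so str() is the identity
-- and 'or ""' coincides with .get's None default: a present empty string strips to "" anyway)
def pvNameOf (st : List (String × String)) : String :=
  PySem.Str.strip (((PySem.Dict.mk st).get? "name").getD "")

def build_subtask_name_index_py (by_id : List (String × List (String × String))) : List (String × List String) :=
  (by_id.foldl (fun idx p =>
      let nm := pvNameOf p.2
      if nm = "" then idx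
      else idx.modify nm [] (· ++ [p.1]))   -- idx.setdefault(nm, []).append(sid)
    PySem.Dict.empty).items

-- ===== PORT B =====
def build_subtask_name_index_py_alt (by_id : List (String × List (String × String))) : List (String × List String) :=
  let pairs0 := by_id.map (fun p => (pvNameOf p.2, p.1))
  let pairs := pairs0.filter (fun q => ¬ (q.1 = ""))
  let names := PySem.List.dedup (pairs.map (·.1))
  names.map (fun nm => (nm, (pairs.filter (fun q => q.1 = nm)).map (·.2)))

-- ===== PRECONDITION & SPEC =====
def Spec_build_subtask_name_index_py (by_id : List (String × List (String × String))) (out : List (String × List String)) : Prop := out = build_subtask_name_index_py_alt by_id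
instance (by_id : List (String × List (String × String))) (out : List (String × List String)) : Decidable (Spec_build_subtask_name_index_py by_id out) := by unfold Spec_build_subtask_name_index_py; infer_instance

-- ===== CLAIM (what is proved, stated in full; the proofs are below) =====
def Claim_equal_build_subtask_name_index_py : Prop := ∀ (by_id : List (String × List (String × String))), Dom_build_subtask_name_index_py by_id → Spec_build_subtask_name_index_py by_id (build_subtask_name_index_py by_id)

-- ===== LEMMAS AND PROOFS =====

-- A's fold over by_id (skipping empty names) equals a plain modify-fold over B's filtered pair list.
theorem pv_foldA_eq (l : List (String × List (String × String)))
    (d : PySem.Dict String (List String)) :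
    l.foldl (fun idx p =>
        let nm := pvNameOf p.2
        if nm = "" then idx
        else idx.modify nm [] (· ++ [p.1])) d
    = ((l.map (fun p => (pvNameOf p.2, p.1))).filter (fun q => ¬ (q.1 = ""))).foldl
        (fun d q => d.modify q.1 [] (· ++ [q.2])) d := by
  induction l generalizing d with
  | nil => rfl
  | cons p l ih =>
    simp only [List.foldl_cons, List.map_cons, List.filter_cons]
    by_cases h : pvNameOf p.2 = "" <;> simp [h, ih]

-- ===== VERDICT (by name: the statement is the Claim_ definition above) =====

theorem build_subtask_name_index_py_spec : Claim_equal_build_subtask_name_index_py := by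
  intro by_id _
  unfold Spec_build_subtask_name_index_py build_subtask_name_index_py build_subtask_name_index_py_alt
  rw [pv_foldA_eq]
  set ps := ((by_id.map (fun p => (pvNameOf p.2, p.1))).filter (fun q => ¬ (q.1 = ""))) with hps
  have hnd : (ps.foldl (fun d q => d.modify q.1 [] (· ++ [q.2])) PySem.Dict.empty).keys.Nodup := by
    exact PySem.Dict.nodup_keys_foldl_modify_key ps Prod.fst [] (fun _ q => (· ++ [q.2])) _
      (by simp [PySem.Dict.keys_empty])
  have hkeys : (ps.foldl (fun d q => d.modify q.1 [] (· ++ [q.2])) PySem.Dict.empty).keys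
      = PySem.List.dedup (ps.map (·.1)) := by
    rw [PySem.Dict.keys_foldl_modify_key]
    simp [PySem.Dict.keys_empty, PySem.Set.update_nil_left, PySem.List.dedup_eq_ofList]
  rw [PySem.Dict.items_eq_map_keys _ hnd [], hkeys]
  refine List.map_congr_left (fun k hk => ?_)
  rw [PySem.Dict.getD_foldl_modify_append]
  have hk' : k ≠ "" := by
    rw [PySem.List.mem_dedup, List.mem_map] at hk
    obtain ⟨r, hr, rfl⟩ := hk
    rw [hps, List.mem_filter] at hr
    exact of_decide_eq_true hr.2
  simp only [PySem.Dict.getD_empty, List.nil_append]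
  rw [hps]
  simp only [List.filter_filter]
  refine congrArg _ (congrArg _ (List.filter_congr (fun a _ => ?_)))
  by_cases h : a.1 = k <;> simp [h, hk']
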